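-- pv_equiv track=rewrite | github.com/Granzort47/whitelist | 01-generator.py | remove_subdomains
-- ===== SOURCE A (Python) =====
-- def remove_subdomains(domain_list):
--     result = []
--     for domain in domain_list:
--         is_subdomain = False
--         for other_domain in domain_list:
--             if domain != other_domain and domain.endswith("." + other_domain):
--                 is_subdomain = True
--                 break
--         if not is_subdomain:
--             result.append(domain)
--     return result
-- ===== SOURCE B (Python) =====
-- def remove_subdomains(domain_list):
--     domains = set(domain_list)
--
--     def has_listed_parent(domain):
--         suffix = domain
--         while suffix:
--             head, suffix = suffix[0], suffix[1:]
--             if head == '.' and suffix in domains: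
--                 return True
--         return False
--
--     return [d for d in domain_list if not has_listed_parent(d)]
-- ===== Notes on version B (the rewrite author's own statement) =====
-- stated objective: faster
-- what changed: Instead of testing every domain against every other domain with endswith (quadratic scan), B hashes all domains into a set once and, for each domain, checks each of its dot-separated proper suffixes for membership in the set.
import Mathlib
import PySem

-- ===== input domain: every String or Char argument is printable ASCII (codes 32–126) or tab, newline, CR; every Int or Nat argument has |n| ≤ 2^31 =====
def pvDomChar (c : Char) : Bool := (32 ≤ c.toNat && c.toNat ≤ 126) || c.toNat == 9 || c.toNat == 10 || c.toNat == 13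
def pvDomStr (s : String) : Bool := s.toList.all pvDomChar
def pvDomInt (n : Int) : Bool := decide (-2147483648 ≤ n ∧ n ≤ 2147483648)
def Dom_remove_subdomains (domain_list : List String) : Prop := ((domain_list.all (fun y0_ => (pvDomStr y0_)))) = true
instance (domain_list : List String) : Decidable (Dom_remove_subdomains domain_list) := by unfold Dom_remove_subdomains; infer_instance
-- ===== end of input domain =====

-- B replaces A's quadratic all-pairs endswith scan by a set of all domains plus a
-- walk over each domain's dot-suffixes (objective: faster, asymptotic).

-- ===== PORT A =====
-- inner 'for other_domain in domain_list: … break' loop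
def pvAInner (domain : String) : List String → Bool
  | [] => false
  | o :: rest =>
      if domain ≠ o ∧ PySem.Chars.endswith domain.toList ('.' :: o.toList) then true
      else pvAInner domain rest

def remove_subdomains (domain_list : List String) : List String :=
  domain_list.foldl
    (fun result domain =>
      if pvAInner domain domain_list then result else result ++ [domain])
    []

-- ===== PORT B =====
-- 'has_listed_parent': walk the suffixes of the domain, testing set membership after each '.'
def pvHasParent (domains : PySem.Set String) : List Char → Bool
  | [] => false
  | c :: suffix =>
      if c = '.' ∧ PySem.Set.contains domains (String.ofList suffix) then true
      else pvHasParent domains suffix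

def remove_subdomains_alt (domain_list : List String) : List String :=
  let domains := PySem.Set.ofList domain_list
  domain_list.filter (fun d => !pvHasParent domains d.toList)

-- ===== PRECONDITION & SPEC =====
def Spec_remove_subdomains (domain_list : List String) (out : List String) : Prop := out = remove_subdomains_alt domain_list
instance (domain_list : List String) (out : List String) : Decidable (Spec_remove_subdomains domain_list out) := by unfold Spec_remove_subdomains; infer_instance

-- ===== CLAIM (what is proved, stated in full; the proofs are below) =====
def Claim_equal_remove_subdomains : Prop := ∀ (domain_list : List String), Dom_remove_subdomains domain_list → Spec_remove_subdomains domain_list (remove_subdomains domain_list)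

-- ===== LEMMAS AND PROOFS =====

theorem pvAInner_iff (domain : String) (l : List String) :
    pvAInner domain l = true ↔
      ∃ o ∈ l, domain ≠ o ∧ ('.' :: o.toList) <:+ domain.toList := by
  induction l with
  | nil => simp [pvAInner]
  | cons o rest ih =>
      simp only [pvAInner]
      by_cases h : domain ≠ o ∧ PySem.Chars.endswith domain.toList ('.' :: o.toList)
      · simp only [if_pos h]
        rcases h with ⟨hne, hend⟩
        simp only [true_iff]
        exact ⟨o, List.mem_cons_self .., hne, (PySem.Chars.endswith_iff _ _).1 hend⟩
      · simp only [if_neg h, ih]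
        constructor
        · rintro ⟨x, hx, hne, hs⟩
          exact ⟨x, List.mem_cons_of_mem _ hx, hne, hs⟩
        · rintro ⟨x, hx, hne, hs⟩
          rcases List.mem_cons.1 hx with rfl | hx
          · exact absurd ⟨hne, (PySem.Chars.endswith_iff _ _).2 hs⟩ h
          · exact ⟨x, hx, hne, hs⟩

theorem pvHasParent_iff (s : PySem.Set String) (cs : List Char) :
    pvHasParent s cs = true ↔
      ∃ t : List Char, ('.' :: t) <:+ cs ∧ String.ofList t ∈ s := by
  induction cs with
  | nil =>
      simp only [pvHasParent, Bool.false_eq_true, false_iff]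
      rintro ⟨t, ⟨u, hu⟩, -⟩
      exact absurd (congrArg List.length hu) (by simp)
  | cons c suffix ih =>
      simp only [pvHasParent]
      by_cases h : c = '.' ∧ PySem.Set.contains s (String.ofList suffix)
      · simp only [if_pos h, true_iff]
        exact ⟨suffix, h.1 ▸ List.suffix_refl _, (PySem.Set.contains_iff _ _).1 h.2⟩
      · simp only [if_neg h, ih]
        constructor
        · rintro ⟨t, ht, hm⟩
          exact ⟨t, ht.trans (List.suffix_cons _ _), hm⟩
        · rintro ⟨t, ht, hm⟩
          rcases ht with ⟨u, hu⟩
          cases u with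
          | nil =>
              cases hu
              exact absurd ⟨rfl, (PySem.Set.contains_iff _ _).2 hm⟩ h
          | cons a u =>
              refine ⟨t, ⟨u, ?_⟩, hm⟩
              exact (List.cons.injEq .. ▸ hu).2

theorem pvInner_eq (domain : String) (l : List String) :
    pvAInner domain l = pvHasParent (PySem.Set.ofList l) domain.toList := by
  by_cases h : pvHasParent (PySem.Set.ofList l) domain.toList = true
  · rw [h]
    rcases (pvHasParent_iff _ _).1 h with ⟨t, hs, hm⟩
    apply (pvAInner_iff domain l).2
    refine ⟨String.ofList t, (PySem.Set.mem_ofList _ _).1 hm, ?_,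
      by simpa [String.toList_ofList] using hs⟩
    intro he
    have hlen := hs.length_le
    have : domain.toList = t := by rw [he, String.toList_ofList]
    simp [this] at hlen
  · rw [Bool.not_eq_true] at h
    rw [h]
    rw [Bool.eq_false_iff] at h ⊢
    intro hA
    apply h
    rcases (pvAInner_iff domain l).1 hA with ⟨o, ho, _, hs⟩
    exact (pvHasParent_iff _ _).2 ⟨o.toList, hs, (PySem.Set.mem_ofList _ _).2 (by simpa using ho)⟩

-- ===== VERDICT (by name: the statement is the Claim_ definition above) =====
theorem remove_subdomains_spec : Claim_equal_remove_subdomains := by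
  intro domain_list _
  unfold Spec_remove_subdomains remove_subdomains remove_subdomains_alt
  have : ∀ d : String, pvAInner d domain_list =
      pvHasParent (PySem.Set.ofList domain_list) d.toList := fun d => pvInner_eq d domain_list
  calc domain_list.foldl
        (fun result domain => if pvAInner domain domain_list then result else result ++ [domain]) []
      = domain_list.foldl
        (fun result domain => if (!pvAInner domain domain_list) = true then result ++ [domain] else result) [] := by
        congr 1
        funext a x
        by_cases h : pvAInner x domain_list <;> simp [h]
    _ = [] ++ domain_list.filter (fun domain => !pvAInner domain domain_list) :=
        PySem.List.foldl_append_if_eq_filter _ _ _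
    _ = domain_list.filter (fun d => !pvHasParent (PySem.Set.ofList domain_list) d.toList) := by
        simp only [List.nil_append]
        exact List.filter_congr (fun x _ => by rw [this x])
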